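-- pv_equiv track=rewrite | github.com/carlzimmerman/zimmerman-formula | extended_research/biotech/z2_protein_folder_v6.py | _enforce_minimum_lengths
-- ===== SOURCE A (Python) =====
-- from typing import Dict, List, Tuple
--
-- def _enforce_minimum_lengths(ss: List[str]) -> List[str]:
--     """Enforce minimum segment lengths."""
--     n = len(ss)
--     result = ss.copy()
--
--     i = 0
--     while i < n:
--         curr = result[i]
--         j = i
--         while j < n and result[j] == curr:
--             j += 1
--         length = j - i
--
--         # Helix minimum: 4 residues
--         if curr == 'H' and length < 4:
--             for k in range(i, j):
--                 result[k] = 'C'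
--         # Sheet minimum: 2 residues (allowing short strands)
--         elif curr == 'E' and length < 2:
--             for k in range(i, j):
--                 result[k] = 'C'
--
--         i = j
--
--     return result
-- ===== SOURCE B (Python) =====
-- from typing import List
--
-- def _enforce_minimum_lengths(ss: List[str]) -> List[str]:
--     """Enforce minimum segment lengths, decided per position.
--
--     A position keeps 'H' iff it lies inside some window of 4 consecutive
--     'H's (i.e. its helix run has length >= 4); it keeps 'E' iff an adjacent
--     position is also 'E' (strand run length >= 2); everything else is kept.
--     No run detection or rewriting is performed.
--     """
--     n = len(ss)
--
--     def h_window_at(j):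
--         return 0 <= j and j + 4 <= n and all(ss[k] == 'H' for k in range(j, j + 4))
--
--     out = []
--     for i, c in enumerate(ss):
--         if c == 'H':
--             out.append('H' if any(h_window_at(j) for j in range(i - 3, i + 1)) else 'C')
--         elif c == 'E':
--             out.append('E' if (i > 0 and ss[i - 1] == 'E') or (i + 1 < n and ss[i + 1] == 'E') else 'C')
--         else:
--             out.append(c)
--     return out
-- ===== Notes on version B (the rewrite author's own statement) =====
-- stated objective: alternative
-- what changed: Instead of scanning for maximal runs and rewriting too-short ones, B decides each position independently by a closed local test: a 'H' survives iff some window of 4 consecutive 'H's contains it, a 'E' survives iff an adjacent position is also 'E'; no run boundaries are ever computed and no list is rewritten.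
import Mathlib
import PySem

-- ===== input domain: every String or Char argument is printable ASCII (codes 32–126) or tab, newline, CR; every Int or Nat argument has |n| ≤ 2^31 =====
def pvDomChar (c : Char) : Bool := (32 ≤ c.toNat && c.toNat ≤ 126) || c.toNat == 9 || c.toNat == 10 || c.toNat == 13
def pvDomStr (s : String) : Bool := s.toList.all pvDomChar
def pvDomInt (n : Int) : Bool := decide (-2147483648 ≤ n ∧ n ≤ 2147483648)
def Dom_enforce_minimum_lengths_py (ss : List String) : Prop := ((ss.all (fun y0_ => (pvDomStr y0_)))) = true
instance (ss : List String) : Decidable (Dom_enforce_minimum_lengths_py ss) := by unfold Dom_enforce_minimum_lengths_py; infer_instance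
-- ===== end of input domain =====

-- B replaces A's run scan-and-rewrite by an independent per-position local test
-- (4-window containment for 'H', adjacent-neighbor test for 'E'); objective: alternative
-- algorithm, same O(n) cost.

-- ===== PORT A =====
-- inner `while j < n and result[j] == curr: j += 1`
def pvScanJ (res : List String) (n : Nat) (curr : String) (j : Nat) : Nat :=
  if h : j < n ∧ res.getD j "" = curr then pvScanJ res n curr (j + 1) else j
termination_by n - j
decreasing_by omega

theorem pvScanJ_ge (res : List String) (n : Nat) (curr : String) (j : Nat) :
    j ≤ pvScanJ res n curr j := by
  rw [pvScanJ]
  split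
  · have := pvScanJ_ge res n curr (j + 1); omega
  · omega
termination_by n - j
decreasing_by rename_i h; omega

theorem pvScanJ_gt (res : List String) (n : Nat) (i : Nat) (h : i < n) :
    i < pvScanJ res n (res.getD i "") i := by
  rw [pvScanJ, dif_pos ⟨h, rfl⟩]
  exact Nat.lt_of_lt_of_le (Nat.lt_succ_self i) (pvScanJ_ge res n _ (i + 1))

-- inner `for k in range(i, j): result[k] = 'C'`
def pvSetC (res : List String) (i j : Nat) : List String :=
  if i < j then pvSetC (res.set i "C") (i + 1) j else res
termination_by j - i

-- outer `while i < n` loop of A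
def pvOuter (res : List String) (n i : Nat) : List String :=
  if h : i < n then
    let curr := res.getD i ""
    let j := pvScanJ res n curr i
    let len := j - i
    let res' :=
      if curr = "H" ∧ len < 4 then pvSetC res i j
      else if curr = "E" ∧ len < 2 then pvSetC res i j
      else res
    pvOuter res' n j
  else res
termination_by n - i
decreasing_by have := pvScanJ_gt res n i h; omega

def enforce_minimum_lengths_py (ss : List String) : List String :=
  pvOuter ss ss.length 0

-- ===== PORT B =====
-- `h_window_at(j)`: 0 <= j and j+4 <= n and all(ss[k] == 'H' for k in range(j, j+4))
def pvHWinAt (ss : List String) (j : Int) : Bool :=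
  decide (0 ≤ j) && decide (j + 4 ≤ (ss.length : Int)) &&
    (PySem.List.pyRange j (j + 4) 1).all (fun k => PySem.List.pyGetD ss k "" == "H")

-- `any(h_window_at(j) for j in range(i - 3, i + 1))`
def pvCovered (ss : List String) (i : Int) : Bool :=
  (PySem.List.pyRange (i - 3) (i + 1) 1).any (fun j => pvHWinAt ss j)

-- `(i > 0 and ss[i-1] == 'E') or (i + 1 < n and ss[i+1] == 'E')`
def pvENbr (ss : List String) (i : Int) : Bool :=
  (decide (0 < i) && (PySem.List.pyGetD ss (i - 1) "" == "E")) ||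
  (decide (i + 1 < (ss.length : Int)) && (PySem.List.pyGetD ss (i + 1) "" == "E"))

-- `for i, c in enumerate(ss): …` appending one output per position
def enforce_minimum_lengths_py_alt (ss : List String) : List String :=
  (PySem.List.enumerate ss).map (fun p =>
    if p.2 = "H" then (if pvCovered ss p.1 then "H" else "C")
    else if p.2 = "E" then (if pvENbr ss p.1 then "E" else "C")
    else p.2)

-- ===== PRECONDITION & SPEC =====
def Spec_enforce_minimum_lengths_py (ss : List String) (out : List String) : Prop := out = enforce_minimum_lengths_py_alt ss
instance (ss : List String) (out : List String) : Decidable (Spec_enforce_minimum_lengths_py ss out) := by unfold Spec_enforce_minimum_lengths_py; infer_instance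

-- ===== CLAIM (what is proved, stated in full; the proofs are below) =====
def Claim_equal_enforce_minimum_lengths_py : Prop := ∀ (ss : List String), Dom_enforce_minimum_lengths_py ss → Spec_enforce_minimum_lengths_py ss (enforce_minimum_lengths_py ss)

-- ===== LEMMAS AND PROOFS =====

-- run-rewriting middle form: both ports are proved equal to this
def pvAltGo (l : List String) : List String :=
  match l with
  | [] => []
  | x :: xs =>
    let g := x :: xs.takeWhile (fun y => y == x)
    (if (x = "H" ∧ g.length < 4) ∨ (x = "E" ∧ g.length < 2)
       then List.replicate g.length "C" else g)
      ++ pvAltGo (xs.dropWhile (fun y => y == x))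
termination_by l.length
decreasing_by simpa using Nat.lt_succ_of_le (xs.length_dropWhile_le _)

theorem pv_getD_append (pre l : List String) :
    (pre ++ l).getD pre.length "" = l.getD 0 "" := by
  simp [List.getD, List.getElem?_append_right]

-- scanning from the start of a run of `curr` stops exactly after the run
theorem pvScanJ_run (curr : String) (run : List String)
    (hrun : ∀ y ∈ run, y = curr) :
    ∀ (pre d : List String), (∀ y ∈ d.head?, y ≠ curr) →
    pvScanJ (pre ++ (run ++ d)) (pre.length + (run.length + d.length)) curr pre.length
      = pre.length + run.length := by
  induction run with
  | nil =>
    intro pre d hd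
    rw [pvScanJ, dif_neg]
    · simp
    · rintro ⟨h1, h2⟩
      cases d with
      | nil => simp at h1
      | cons y d' =>
        simp only [List.nil_append, List.getD] at h2
        exact hd y (by simp) (by simpa using h2)
  | cons a run ih =>
    intro pre d hd
    have ha : a = curr := hrun a (by simp)
    rw [pvScanJ, dif_pos]
    · have hlist : pre ++ (a :: run ++ d) = (pre ++ [a]) ++ (run ++ d) := by simp
      have hlen : pre.length + ((a :: run).length + d.length)
          = (pre ++ [a]).length + (run.length + d.length) := by simp; omega
      have hplen : pre.length + 1 = (pre ++ [a]).length := by simp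
      rw [hlist, hlen, hplen, ih (fun y hy => hrun y (by simp [hy])) (pre ++ [a]) d hd]
      omega
    · constructor
      · simp
      · rw [show pre ++ (a :: run ++ d) = pre ++ (a :: (run ++ d)) by simp,
          pv_getD_append]
        simpa using ha

-- rewriting positions [pre.length, pre.length + run.length) with 'C'
theorem pvSetC_run (run : List String) :
    ∀ (pre d : List String),
    pvSetC (pre ++ (run ++ d)) pre.length (pre.length + run.length)
      = pre ++ (List.replicate run.length "C" ++ d) := by
  induction run with
  | nil => intro pre d; rw [pvSetC, if_neg (by simp)]; simp
  | cons a run ih =>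
    intro pre d
    rw [pvSetC, if_pos (by simp)]
    have hset : (pre ++ (a :: run ++ d)).set pre.length "C"
        = (pre ++ ["C"]) ++ (run ++ d) := by
      rw [List.set_append]
      simp
    rw [hset, show pre.length + 1 = (pre ++ ["C"]).length by simp,
      show pre.length + (a :: run).length = (pre ++ ["C"]).length + run.length by
        simp only [List.length_append, List.length_cons, List.length_nil]; omega,
      ih (pre ++ ["C"]) d]
    simp [List.replicate_succ]

theorem pv_head_dropWhile_ne (x : String) (xs : List String) :
    ∀ y ∈ (xs.dropWhile (fun y => y == x)).head?, y ≠ x := by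
  induction xs with
  | nil => simp
  | cons a as ih =>
    by_cases hax : (a == x) = true
    · simpa [List.dropWhile_cons, hax] using ih
    · intro y hy
      simp only [List.dropWhile_cons, hax] at hy
      simp at hy
      subst hy
      simpa using hax

theorem pvOuter_eq_altGo (k : Nat) :
    ∀ (cur : List String), cur.length ≤ k →
    ∀ (pre : List String),
      pvOuter (pre ++ cur) (pre.length + cur.length) pre.length = pre ++ pvAltGo cur := by
  induction k with
  | zero =>
    intro cur hk pre
    have : cur = [] := by
      cases cur with
      | nil => rfl
      | cons x xs => simp at hk
    subst this
    rw [pvOuter, dif_neg (by simp)]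
    simp [pvAltGo]
  | succ k ih =>
    intro cur hk pre
    cases cur with
    | nil =>
      rw [pvOuter, dif_neg (by simp)]
      simp [pvAltGo]
    | cons x xs =>
      set t := xs.takeWhile (fun y => y == x) with ht
      set d := xs.dropWhile (fun y => y == x) with hd
      have hxs : xs = t ++ d := (xs.takeWhile_append_dropWhile (p := fun y => y == x)).symm
      have hcur : x :: xs = (x :: t) ++ d := by simp [hxs]
      have hlen : (x :: xs).length = (x :: t).length + d.length := by
        simp [hxs]; omega
      have hruncurr : ∀ y ∈ x :: t, y = x := by
        intro y hy
        rcases List.mem_cons.mp hy with h | h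
        · exact h
        · have := List.mem_takeWhile_imp (ht ▸ h)
          simpa using this
      have hdhead : ∀ y ∈ d.head?, y ≠ x := by
        rw [hd]; exact pv_head_dropWhile_ne x xs
      rw [pvOuter]
      rw [dif_pos (by simp)]
      simp only []
      have hcurr : (pre ++ (x :: xs)).getD pre.length "" = x := by
        rw [pv_getD_append]; simp [List.getD]
      have hscan :
          pvScanJ (pre ++ (x :: xs)) (pre.length + (x :: xs).length)
            ((pre ++ (x :: xs)).getD pre.length "") pre.length
          = pre.length + (x :: t).length := by
        rw [hcurr]
        calc pvScanJ (pre ++ (x :: xs)) (pre.length + (x :: xs).length) x pre.length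
            = pvScanJ (pre ++ ((x :: t) ++ d)) (pre.length + ((x :: t).length + d.length)) x pre.length := by
              rw [← hcur, ← hlen]
          _ = pre.length + (x :: t).length := pvScanJ_run x (x :: t) hruncurr pre d hdhead
      rw [hscan, hcurr]
      have hdlen : d.length ≤ k := by
        have : (x :: xs).length ≤ k + 1 := hk
        simp [hlen] at this ⊢
        omega
      have hIH := ih d hdlen
      have hsub : pre.length + (x :: t).length - pre.length = (x :: t).length := by omega
      rw [hsub]
      by_cases hc : (x = "H" ∧ (x :: t).length < 4) ∨ (x = "E" ∧ (x :: t).length < 2)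
      · have hsetr :
            pvSetC (pre ++ (x :: xs)) pre.length (pre.length + (x :: t).length)
              = pre ++ (List.replicate (x :: t).length "C" ++ d) := by
          rw [hcur]; exact pvSetC_run (x :: t) pre d
        have hres' :
            (if x = "H" ∧ (x :: t).length < 4 then
                pvSetC (pre ++ (x :: xs)) pre.length (pre.length + (x :: t).length)
              else if x = "E" ∧ (x :: t).length < 2 then
                pvSetC (pre ++ (x :: xs)) pre.length (pre.length + (x :: t).length)
              else pre ++ (x :: xs))
            = pre ++ (List.replicate (x :: t).length "C" ++ d) := by
          rcases hc with h | h
          · rw [if_pos h, hsetr]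
          · by_cases h4 : x = "H" ∧ (x :: t).length < 4
            · rw [if_pos h4, hsetr]
            · rw [if_neg h4, if_pos h, hsetr]
        rw [hres']
        have hshape : pre ++ (List.replicate (x :: t).length "C" ++ d)
            = (pre ++ List.replicate (x :: t).length "C") ++ d := by simp
        have hplen2 : pre.length + (x :: t).length
            = (pre ++ List.replicate (x :: t).length "C").length := by simp
        have hnlen : pre.length + (x :: xs).length
            = (pre ++ List.replicate (x :: t).length "C").length + d.length := by
          simp [hlen]; omega
        rw [hshape, hplen2, hnlen, hIH (pre ++ List.replicate (x :: t).length "C")]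
        rw [pvAltGo]
        simp only [← ht, ← hd]
        rw [if_pos (by simpa using hc)]
        simp
      · have hres' :
            (if x = "H" ∧ (x :: t).length < 4 then
                pvSetC (pre ++ (x :: xs)) pre.length (pre.length + (x :: t).length)
              else if x = "E" ∧ (x :: t).length < 2 then
                pvSetC (pre ++ (x :: xs)) pre.length (pre.length + (x :: t).length)
              else pre ++ (x :: xs))
            = pre ++ (x :: xs) := by
          rw [if_neg (fun h => hc (Or.inl h)), if_neg (fun h => hc (Or.inr h))]
        rw [hres']
        have hshape : pre ++ (x :: xs) = (pre ++ (x :: t)) ++ d := by simp [hcur]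
        have hplen2 : pre.length + (x :: t).length = (pre ++ (x :: t)).length := by simp
        have hnlen : pre.length + (x :: xs).length = (pre ++ (x :: t)).length + d.length := by
          simp [hlen]; omega
        rw [hshape, hplen2, hnlen, hIH (pre ++ (x :: t))]
        rw [pvAltGo]
        simp only [← ht, ← hd]
        rw [if_neg (by simpa using hc)]
        simp

-- ============ B side: pvAltGo = per-position map ============

-- the per-position value B computes at index i
def pvAltAt (ss : List String) (i : Nat) : String :=
  if ss.getD i "" = "H" then (if pvCovered ss (i : Int) then "H" else "C")
  else if ss.getD i "" = "E" then (if pvENbr ss (i : Int) then "E" else "C")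
  else ss.getD i ""

theorem pv_alt_eq_map (ss : List String) :
    enforce_minimum_lengths_py_alt ss = (List.range ss.length).map (fun i => pvAltAt ss i) := by
  apply List.ext_getElem
  · simp [enforce_minimum_lengths_py_alt]
  · intro k h1 h2
    simp only [enforce_minimum_lengths_py_alt, List.getElem_map, List.getElem_range,
      PySem.List.getElem_enumerate, pvAltAt]
    simp at h2
    simp [List.getD, List.getElem?_eq_getElem h2]

-- getD inside the run segment
theorem pv_getD_mid (pre d : List String) (L : Nat) (x : String) (m : Nat)
    (h1 : pre.length ≤ m) (h2 : m < pre.length + L) :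
    (pre ++ (List.replicate L x ++ d)).getD m "" = x := by
  have hm : m - pre.length < L := by omega
  rw [List.getD, List.getElem?_append_right h1, List.getElem?_append_left (by simpa using hm)]
  simp [hm]

-- getD just past the run segment
theorem pv_getD_right (pre d : List String) (L : Nat) (x : String) :
    (pre ++ (List.replicate L x ++ d)).getD (pre.length + L) "" = d.getD 0 "" := by
  rw [List.getD, List.getElem?_append_right (by omega),
    List.getElem?_append_right (by simp)]
  simp [List.getD]

-- getD just before the run segment is pre's last element
theorem pv_getD_left (pre l : List String) (h : pre ≠ []) :
    pre.getLast? = some ((pre ++ l).getD (pre.length - 1) "") := by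
  have hlt : pre.length - 1 < pre.length := by
    cases pre with | nil => simp at h | cons a as => simp
  rw [List.getD, List.getElem?_append_left hlt, List.getLast?_eq_getElem?]
  simp [List.getElem?_eq_getElem hlt]

-- pvHWinAt as a closed condition
theorem pv_hwin_iff (ss : List String) (j : Int) :
    pvHWinAt ss j = true ↔
      0 ≤ j ∧ j + 4 ≤ (ss.length : Int) ∧
        ∀ k : Int, j ≤ k → k < j + 4 → ss.getD k.toNat "" = "H" := by
  simp only [pvHWinAt, Bool.and_eq_true, decide_eq_true_eq, List.all_eq_true, and_assoc,
    beq_iff_eq]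
  constructor
  · rintro ⟨h0, h4, hall⟩
    refine ⟨h0, h4, ?_⟩
    intro k hk1 hk2
    have h0k : 0 ≤ k := le_trans h0 hk1
    have hklen : k < (ss.length : Int) := by omega
    have := hall k (PySem.List.mem_pyRange_one.mpr ⟨hk1, hk2⟩)
    rwa [PySem.List.pyGetD_of_nonneg ss "" h0k] at this
  · rintro ⟨h0, h4, hall⟩
    refine ⟨h0, h4, ?_⟩
    intro k hk
    obtain ⟨hk1, hk2⟩ := PySem.List.mem_pyRange_one.mp hk
    have h0k : 0 ≤ k := le_trans h0 hk1
    have hklen : k < (ss.length : Int) := by omega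
    rw [PySem.List.pyGetD_of_nonneg ss "" h0k]
    exact hall k hk1 hk2

-- the H-window containment test on a maximal "H"-run decides exactly "run length ≥ 4"
theorem pv_covered_run (pre d : List String) (L : Nat)
    (hpre : ∀ a ∈ pre.getLast?, a ≠ "H") (hd : ∀ b ∈ d.head?, b ≠ "H")
    (i : Nat) (h1 : pre.length ≤ i) (h2 : i < pre.length + L) :
    pvCovered (pre ++ (List.replicate L "H" ++ d)) (i : Int) = decide (4 ≤ L) := by
  set ss := pre ++ (List.replicate L "H" ++ d) with hss
  have hn : ss.length = pre.length + L + d.length := by simp [hss]; omega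
  by_cases hL4 : 4 ≤ L
  · rw [decide_eq_true hL4]
    unfold pvCovered
    apply List.any_eq_true.mpr
    refine ⟨((min i (pre.length + L - 4) : Nat) : Int), ?_, ?_⟩
    · rw [PySem.List.mem_pyRange_one]
      constructor <;> omega
    · apply (pv_hwin_iff ss _).mpr
      refine ⟨by omega, by omega, ?_⟩
      intro k hk1 hk2
      have hk0 : 0 ≤ k := by omega
      rw [hss]
      exact pv_getD_mid pre d L "H" k.toNat (by omega) (by omega)
  · rw [decide_eq_false (by omega)]
    unfold pvCovered
    apply List.any_eq_false.mpr
    intro j hj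
    obtain ⟨hj1, hj2⟩ := PySem.List.mem_pyRange_one.mp hj
    intro hwin
    obtain ⟨h0, h4, hget⟩ := (pv_hwin_iff ss j).mp hwin
    by_cases hjs : j < (pre.length : Int)
    · -- the window would contain pre's last element, which is not "H"
      have hs1 : 1 ≤ pre.length := by omega
      have hpre' : pre ≠ [] := by
        cases pre with | nil => simp at hs1 | cons a as => simp
      have hval := hget ((pre.length : Int) - 1) (by omega) (by omega)
      have htn : (((pre.length : Int) - 1)).toNat = pre.length - 1 := by omega
      rw [htn] at hval
      have := pv_getD_left pre (List.replicate L "H" ++ d) hpre'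
      rw [← hss] at this
      exact hpre _ (by rw [this, hval]; rfl) rfl
    · -- the window would contain d's first element, which is not "H"
      have hover : (pre.length : Int) + L < j + 4 := by
        by_contra hle
        omega
      have hdne : d ≠ [] := by
        intro hdnil
        rw [hdnil] at hn
        simp at hn
        omega
      obtain ⟨b, d', rfl⟩ := List.exists_cons_of_ne_nil hdne
      have hval := hget ((pre.length : Int) + L) (by omega) (by omega)
      have htn : (((pre.length : Int) + L)).toNat = pre.length + L := by omega
      rw [htn] at hval
      rw [hss, pv_getD_right] at hval
      exact hd b rfl (by simpa [List.getD] using hval)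

-- the neighbor test on a maximal "E"-run decides exactly "run length ≥ 2"
theorem pv_enbr_run (pre d : List String) (L : Nat)
    (hpre : ∀ a ∈ pre.getLast?, a ≠ "E") (hd : ∀ b ∈ d.head?, b ≠ "E")
    (i : Nat) (h1 : pre.length ≤ i) (h2 : i < pre.length + L) :
    pvENbr (pre ++ (List.replicate L "E" ++ d)) (i : Int) = decide (2 ≤ L) := by
  set ss := pre ++ (List.replicate L "E" ++ d) with hss
  have hn : ss.length = pre.length + L + d.length := by simp [hss]; omega
  by_cases hL2 : 2 ≤ L
  · rw [decide_eq_true hL2]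
    unfold pvENbr
    by_cases hlast : i = pre.length + L - 1
    · -- the left neighbor is inside the run
      refine Bool.or_eq_true_iff.mpr (Or.inl ?_)
      refine Bool.and_eq_true_iff.mpr ⟨by simp only [decide_eq_true_eq]; omega, ?_⟩
      rw [PySem.List.pyGetD_of_nonneg ss "" (by omega)]
      have htn : ((i : Int) - 1).toNat = i - 1 := by omega
      rw [htn, hss, pv_getD_mid pre d L "E" (i - 1) (by omega) (by omega)]
      rfl
    · -- the right neighbor is inside the run
      refine Bool.or_eq_true_iff.mpr (Or.inr ?_)
      refine Bool.and_eq_true_iff.mpr ⟨by simp only [decide_eq_true_eq]; omega, ?_⟩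
      rw [PySem.List.pyGetD_of_nonneg ss "" (by omega)]
      have htn : ((i : Int) + 1).toNat = i + 1 := by omega
      rw [htn, hss, pv_getD_mid pre d L "E" (i + 1) (by omega) (by omega)]
      rfl
  · -- L = 1: both neighbors lie outside the run and differ from "E"
    have hL1 : L = 1 := by omega
    have hieq : i = pre.length := by omega
    rw [decide_eq_false (by omega)]
    unfold pvENbr
    apply Bool.or_eq_false_iff.mpr
    constructor
    · by_cases h0i : 0 < i
      · apply Bool.and_eq_false_iff.mpr; right
        have hs1 : pre ≠ [] := by
          intro hnil
          rw [hnil] at hieq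
          simp at hieq
          omega
        have htn : ((i : Int) - 1).toNat = pre.length - 1 := by omega
        rw [PySem.List.pyGetD_of_nonneg ss "" (by omega), htn]
        have hlast := pv_getD_left pre (List.replicate L "E" ++ d) hs1
        rw [← hss] at hlast
        have : ss.getD (pre.length - 1) "" ≠ "E" := hpre _ hlast
        simpa using this
      · apply Bool.and_eq_false_iff.mpr; left
        simp; omega
    · by_cases hdn : d = []
      · apply Bool.and_eq_false_iff.mpr; left
        have hd0 : d.length = 0 := by simp [hdn]
        simp only [decide_eq_false_iff_not, not_lt]
        omega
      · apply Bool.and_eq_false_iff.mpr; right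
        obtain ⟨b, d', rfl⟩ := List.exists_cons_of_ne_nil hdn
        have htn : ((i : Int) + 1).toNat = pre.length + L := by omega
        rw [PySem.List.pyGetD_of_nonneg ss "" (by omega), htn, hss, pv_getD_right]
        have : b ≠ "E" := hd b rfl
        simpa [List.getD] using this

theorem pv_altAt_run (pre d : List String) (L : Nat) (x : String)
    (hpre : ∀ a ∈ pre.getLast?, a ≠ x) (hd : ∀ b ∈ d.head?, b ≠ x)
    (i : Nat) (h1 : pre.length ≤ i) (h2 : i < pre.length + L) :
    pvAltAt (pre ++ (List.replicate L x ++ d)) i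
      = if (x = "H" ∧ L < 4) ∨ (x = "E" ∧ L < 2) then "C" else x := by
  have hget : (pre ++ (List.replicate L x ++ d)).getD i "" = x := pv_getD_mid pre d L x i h1 h2
  unfold pvAltAt
  rw [hget]
  by_cases hx : x = "H"
  · subst hx
    rw [if_pos rfl, pv_covered_run pre d L hpre hd i h1 h2]
    by_cases h4 : 4 ≤ L
    · have hcond : ¬((("H":String) = "H" ∧ L < 4) ∨ (("H":String) = "E" ∧ L < 2)) := by
        rintro (⟨-, hlt⟩ | ⟨he, -⟩)
        · omega
        · exact absurd he (by decide)
      rw [decide_eq_true h4, if_neg hcond]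
      simp
    · rw [decide_eq_false (by omega), if_pos (Or.inl ⟨rfl, by omega⟩)]
      simp
  · by_cases hxe : x = "E"
    · subst hxe
      rw [if_neg hx, if_pos rfl, pv_enbr_run pre d L hpre hd i h1 h2]
      by_cases h2' : 2 ≤ L
      · have hcond : ¬((("E":String) = "H" ∧ L < 4) ∨ (("E":String) = "E" ∧ L < 2)) := by
          rintro (⟨he, -⟩ | ⟨-, hlt⟩)
          · exact absurd he (by decide)
          · omega
        rw [decide_eq_true h2', if_neg hcond]
        simp
      · rw [decide_eq_false (by omega), if_pos (Or.inr ⟨rfl, by omega⟩)]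
        simp
    · have hcond : ¬((x = "H" ∧ L < 4) ∨ (x = "E" ∧ L < 2)) := by
        rintro (⟨he, -⟩ | ⟨he, -⟩)
        · exact hx he
        · exact hxe he
      rw [if_neg hx, if_neg hxe, if_neg hcond]

theorem pv_map_eq_altGo (k : Nat) :
    ∀ (cur : List String), cur.length ≤ k →
    ∀ (pre : List String), (∀ a ∈ pre.getLast?, ∀ b ∈ cur.head?, a ≠ b) →
      (List.range' pre.length cur.length).map (fun i => pvAltAt (pre ++ cur) i)
        = pvAltGo cur := by
  induction k with
  | zero =>
    intro cur hk pre hb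
    have : cur = [] := List.eq_nil_of_length_eq_zero (by omega)
    subst this
    simp [pvAltGo]
  | succ k ih =>
    intro cur hk pre hb
    cases cur with
    | nil => simp [pvAltGo]
    | cons x xs =>
      set t := xs.takeWhile (fun y => y == x) with ht
      set d := xs.dropWhile (fun y => y == x) with hd
      have hxs : xs = t ++ d := (xs.takeWhile_append_dropWhile (p := fun y => y == x)).symm
      set L := (x :: t).length with hL
      have hL0 : 0 < L := by simp [hL]
      have hrun : ∀ y ∈ x :: t, y = x := by
        intro y hy
        rcases List.mem_cons.mp hy with h | h
        · exact h
        · have := List.mem_takeWhile_imp (ht ▸ h)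
          simpa using this
      have hrep : x :: t = List.replicate L x := List.eq_replicate_iff.mpr ⟨rfl, hrun⟩
      have hdh : ∀ b ∈ d.head?, b ≠ x := by
        rw [hd]; exact pv_head_dropWhile_ne x xs
      have hpre1 : ∀ a ∈ pre.getLast?, a ≠ x := fun a ha => hb a ha x rfl
      have hsplit : pre ++ (x :: xs) = pre ++ (List.replicate L x ++ d) := by
        rw [show x :: xs = (x :: t) ++ d by simp [hxs], hrep]
      have hlen : (x :: xs).length = L + d.length := by
        rw [show x :: xs = (x :: t) ++ d by simp [hxs]]
        simp [hL]
        omega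
      have hr : List.range' pre.length (L + d.length)
          = List.range' pre.length L ++ List.range' (pre.length + L) d.length := by
        have := List.range'_append (s := pre.length) (m := L) (n := d.length) (step := 1)
        simpa using this.symm
      rw [hlen, hr, List.map_append]
      have hfst : (List.range' pre.length L).map (fun i => pvAltAt (pre ++ (x :: xs)) i)
          = (if (x = "H" ∧ L < 4) ∨ (x = "E" ∧ L < 2) then List.replicate L "C" else x :: t) := by
        by_cases hc : (x = "H" ∧ L < 4) ∨ (x = "E" ∧ L < 2)
        · rw [if_pos hc]
          apply List.eq_replicate_iff.mpr
          refine ⟨by simp, ?_⟩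
          intro b hbm
          obtain ⟨i, him, rfl⟩ := List.mem_map.mp hbm
          obtain ⟨hi1, hi2⟩ := List.mem_range'_1.mp him
          rw [hsplit, pv_altAt_run pre d L x hpre1 hdh i hi1 hi2, if_pos hc]
        · rw [if_neg hc, hrep]
          apply List.eq_replicate_iff.mpr
          refine ⟨by simp, ?_⟩
          intro b hbm
          obtain ⟨i, him, rfl⟩ := List.mem_map.mp hbm
          obtain ⟨hi1, hi2⟩ := List.mem_range'_1.mp him
          rw [hsplit, pv_altAt_run pre d L x hpre1 hdh i hi1 hi2, if_neg hc]
      have hsnd : (List.range' (pre.length + L) d.length).map (fun i => pvAltAt (pre ++ (x :: xs)) i)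
          = pvAltGo d := by
        have hsh : pre ++ (x :: xs) = (pre ++ (x :: t)) ++ d := by simp [hxs]
        have hln : pre.length + L = (pre ++ (x :: t)).length := by simp [hL]
        have hdlen : d.length ≤ k := by
          have h := hk
          rw [hlen] at h
          omega
        rw [hsh, hln]
        apply ih d hdlen (pre ++ (x :: t))
        intro a ha b hbm
        rw [List.getLast?_append, hrep] at ha
        obtain ⟨m, hm⟩ : ∃ m, L = m + 1 := ⟨L - 1, by omega⟩
        have hrl : (List.replicate L x).getLast? = some x := by
          rw [hm]
          simp [List.getLast?_replicate]
        rw [hrl] at ha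
        simp at ha
        subst ha
        exact (hdh b hbm).symm
      rw [hfst, hsnd, pvAltGo]

theorem pv_alt_eq_altGo (ss : List String) :
    enforce_minimum_lengths_py_alt ss = pvAltGo ss := by
  rw [pv_alt_eq_map, List.range_eq_range']
  have := pv_map_eq_altGo ss.length ss le_rfl [] (by simp)
  simpa using this

-- ===== VERDICT (by name: the statement is the Claim_ definition above) =====
theorem enforce_minimum_lengths_py_spec : Claim_equal_enforce_minimum_lengths_py := by
  intro ss _
  unfold Spec_enforce_minimum_lengths_py enforce_minimum_lengths_py
  rw [pv_alt_eq_altGo]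
  have := pvOuter_eq_altGo ss.length ss le_rfl []
  simpa using this
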